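-- pv_equiv track=rewrite | github.com/8agana/Federation | System/Federation-MCPs/FederationWeb/src/federation_web/tools/interests.py | _categorize_visuals
-- ===== SOURCE A (Python) =====
-- from typing import Dict, Any, List, Optional
--
-- def _categorize_visuals(discoveries: List[Dict]) -> Dict[str, int]:
--     """Categorize visual discoveries"""
--     categories = {
--         "diagrams": 0,
--         "photos": 0,
--         "infographics": 0,
--         "charts": 0,
--         "other": 0
--     }
--
--     for discovery in discoveries:
--         title_lower = discovery.get("title", "").lower()
--         if "diagram" in title_lower:
--             categories["diagrams"] += 1
--         elif "photo" in title_lower or "image" in title_lower: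
--             categories["photos"] += 1
--         elif "infographic" in title_lower:
--             categories["infographics"] += 1
--         elif "chart" in title_lower or "graph" in title_lower:
--             categories["charts"] += 1
--         else:
--             categories["other"] += 1
--
--     return {k: v for k, v in categories.items() if v > 0}
-- ===== SOURCE B (Python) =====
-- _RULES = [
--     ("diagrams", ["diagram"]),
--     ("photos", ["photo", "image"]),
--     ("infographics", ["infographic"]),
--     ("charts", ["chart", "graph"]),
-- ]
--
--
-- def _categorize_visuals(discoveries):
--     # sieve: per-category passes over the surviving titles; each pass keeps
--     # the count of titles it matched and removes them from the pool
--     remaining = [d.get("title", "").lower() for d in discoveries]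
--     result = {}
--     for name, kws in _RULES:
--         matched = [t for t in remaining if any(k in t for k in kws)]
--         if matched:
--             result[name] = len(matched)
--         remaining = [t for t in remaining if not any(k in t for k in kws)]
--     if remaining:
--         result["other"] = len(remaining)
--     return result
-- ===== Notes on version B (the rewrite author's own statement) =====
-- stated objective: alternative
-- what changed: Replaces A's per-item elif classification into a mutable 5-key counter dict with a sieve of staged passes: for each category in priority order one pass counts the matching titles and a second removes them from the pool, leftovers become 'other'; no per-item category is ever computed and only positive counts are inserted.
import Mathlib
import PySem

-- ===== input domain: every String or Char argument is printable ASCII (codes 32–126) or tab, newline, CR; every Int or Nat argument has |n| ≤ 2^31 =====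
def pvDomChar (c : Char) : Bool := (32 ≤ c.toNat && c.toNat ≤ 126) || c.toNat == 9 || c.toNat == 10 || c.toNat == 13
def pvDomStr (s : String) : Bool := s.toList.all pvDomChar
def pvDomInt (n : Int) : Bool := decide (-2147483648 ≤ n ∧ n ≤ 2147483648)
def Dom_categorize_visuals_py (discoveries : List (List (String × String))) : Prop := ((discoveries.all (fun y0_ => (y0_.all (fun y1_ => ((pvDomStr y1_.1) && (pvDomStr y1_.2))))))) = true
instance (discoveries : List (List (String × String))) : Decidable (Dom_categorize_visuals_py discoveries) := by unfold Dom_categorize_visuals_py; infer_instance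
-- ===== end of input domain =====

-- B replaces A's per-item elif classification into a fixed 5-key counter dict with a sieve of
-- per-category passes over a shrinking pool of titles (alternative decomposition, same cost).

-- ===== PORT A =====
-- one loop body of A: lower the title, increment the first matching fixed category
def cvStep (categories : PySem.Dict String Int) (discovery : List (String × String)) :
    PySem.Dict String Int :=
  let title_lower := PySem.Str.lower ((PySem.Dict.ofList discovery).getD "title" "")
  if PySem.Str.isIn "diagram" title_lower then categories.modify "diagrams" 0 (· + 1)
  else if PySem.Str.isIn "photo" title_lower || PySem.Str.isIn "image" title_lower then
    categories.modify "photos" 0 (· + 1)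
  else if PySem.Str.isIn "infographic" title_lower then categories.modify "infographics" 0 (· + 1)
  else if PySem.Str.isIn "chart" title_lower || PySem.Str.isIn "graph" title_lower then
    categories.modify "charts" 0 (· + 1)
  else categories.modify "other" 0 (· + 1)

def categorize_visuals_py (discoveries : List (List (String × String))) : List (String × Int) :=
  let categories : PySem.Dict String Int :=
    PySem.Dict.ofList [("diagrams", 0), ("photos", 0), ("infographics", 0), ("charts", 0), ("other", 0)]
  let final := discoveries.foldl cvStep categories
  -- {k: v for k, v in categories.items() if v > 0}
  final.items.filter (fun kv => kv.2 > 0)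

-- ===== PORT B =====
-- Source B's rules table (the four named categories and their keyword lists)
def cvRulesB : List (String × List String) :=
  [("diagrams", ["diagram"]), ("photos", ["photo", "image"]),
   ("infographics", ["infographic"]), ("charts", ["chart", "graph"])]

-- Source B's loop body: one sieve pass for one rule; state = (remaining titles, result entries)
def cvSieve (st : List String × List (String × Int)) (rule : String × List String) :
    List String × List (String × Int) :=
  let matched := st.1.filter (fun t => rule.2.any (fun k => PySem.Str.isIn k t))
  let result := if matched.length > 0 then st.2 ++ [(rule.1, (matched.length : Int))] else st.2
  (st.1.filter (fun t => !(rule.2.any (fun k => PySem.Str.isIn k t))), result)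

def categorize_visuals_py_alt (discoveries : List (List (String × String))) : List (String × Int) :=
  let remaining := discoveries.map (fun d => PySem.Str.lower ((PySem.Dict.ofList d).getD "title" ""))
  let fin := cvRulesB.foldl cvSieve (remaining, [])
  if fin.1.length > 0 then fin.2 ++ [("other", (fin.1.length : Int))] else fin.2

-- ===== PRECONDITION & SPEC =====
def Spec_categorize_visuals_py (discoveries : List (List (String × String))) (out : List (String × Int)) : Prop := out = categorize_visuals_py_alt discoveries
instance (discoveries : List (List (String × String))) (out : List (String × Int)) : Decidable (Spec_categorize_visuals_py discoveries out) := by unfold Spec_categorize_visuals_py; infer_instance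

-- ===== CLAIM (what is proved, stated in full; the proofs are below) =====
def Claim_equal_categorize_visuals_py : Prop := ∀ (discoveries : List (List (String × String))), Dom_categorize_visuals_py discoveries → Spec_categorize_visuals_py discoveries (categorize_visuals_py discoveries)

-- ===== LEMMAS AND PROOFS =====

-- lowered title of one discovery
def cvTl (d : List (String × String)) : String :=
  PySem.Str.lower ((PySem.Dict.ofList d).getD "title" "")

-- the priority-resolved category predicates, in the exact shape of B's composed sieve filters
def cvQ1 (t : String) : Bool := ["diagram"].any fun k => PySem.Str.isIn k t
def cvQ2 (t : String) : Bool :=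
  (["photo", "image"].any fun k => PySem.Str.isIn k t) &&
    !(["diagram"].any fun k => PySem.Str.isIn k t)
def cvQ3 (t : String) : Bool :=
  (["infographic"].any fun k => PySem.Str.isIn k t) &&
    ((!(["photo", "image"].any fun k => PySem.Str.isIn k t)) &&
      !(["diagram"].any fun k => PySem.Str.isIn k t))
def cvQ4 (t : String) : Bool :=
  (["chart", "graph"].any fun k => PySem.Str.isIn k t) &&
    ((!(["infographic"].any fun k => PySem.Str.isIn k t)) &&
      ((!(["photo", "image"].any fun k => PySem.Str.isIn k t)) &&
        !(["diagram"].any fun k => PySem.Str.isIn k t)))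
def cvQ5 (t : String) : Bool :=
  (!(["chart", "graph"].any fun k => PySem.Str.isIn k t)) &&
    ((!(["infographic"].any fun k => PySem.Str.isIn k t)) &&
      ((!(["photo", "image"].any fun k => PySem.Str.isIn k t)) &&
        !(["diagram"].any fun k => PySem.Str.isIn k t)))

-- the five-slot literal dict A's loop maintains
def cvLit (a b c d e : Int) : PySem.Dict String Int :=
  PySem.Dict.ofList [("diagrams", a), ("photos", b), ("infographics", c), ("charts", d), ("other", e)]

theorem cvLit_modify (a b c d e : Int) :
    ((cvLit a b c d e).modify "diagrams" 0 (· + 1) = cvLit (a+1) b c d e) ∧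
    ((cvLit a b c d e).modify "photos" 0 (· + 1) = cvLit a (b+1) c d e) ∧
    ((cvLit a b c d e).modify "infographics" 0 (· + 1) = cvLit a b (c+1) d e) ∧
    ((cvLit a b c d e).modify "charts" 0 (· + 1) = cvLit a b c (d+1) e) ∧
    ((cvLit a b c d e).modify "other" 0 (· + 1) = cvLit a b c d (e+1)) := by
  refine ⟨?_, ?_, ?_, ?_, ?_⟩ <;>
    simp [cvLit, PySem.Dict.ofList, PySem.Dict.modify, PySem.Dict.getD, PySem.Dict.get?,
      PySem.Dict.insert, PySem.Dict.update, PySem.Dict.empty, PySem.Dict.contains, List.find?]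

set_option maxHeartbeats 1600000 in
theorem cvStep_eq (x : List (String × String)) (a b c d e : Int) :
    cvStep (cvLit a b c d e) x =
      cvLit (a + if cvQ1 (cvTl x) then 1 else 0)
            (b + if cvQ2 (cvTl x) then 1 else 0)
            (c + if cvQ3 (cvTl x) then 1 else 0)
            (d + if cvQ4 (cvTl x) then 1 else 0)
            (e + if cvQ5 (cvTl x) then 1 else 0) := by
  unfold cvStep cvQ1 cvQ2 cvQ3 cvQ4 cvQ5 cvTl
  simp only [List.any_cons, List.any_nil, Bool.or_false]
  cases h1 : PySem.Str.isIn "diagram" (PySem.Str.lower ((PySem.Dict.ofList x).getD "title" "")) <;>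
  cases h2 : PySem.Str.isIn "photo" (PySem.Str.lower ((PySem.Dict.ofList x).getD "title" "")) <;>
  cases h3 : PySem.Str.isIn "image" (PySem.Str.lower ((PySem.Dict.ofList x).getD "title" "")) <;>
  cases h4 : PySem.Str.isIn "infographic" (PySem.Str.lower ((PySem.Dict.ofList x).getD "title" "")) <;>
  cases h5 : PySem.Str.isIn "chart" (PySem.Str.lower ((PySem.Dict.ofList x).getD "title" "")) <;>
  cases h6 : PySem.Str.isIn "graph" (PySem.Str.lower ((PySem.Dict.ofList x).getD "title" "")) <;>
    (simp [(cvLit_modify a b c d e).1, (cvLit_modify a b c d e).2.1,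
       (cvLit_modify a b c d e).2.2.1, (cvLit_modify a b c d e).2.2.2.1,
       (cvLit_modify a b c d e).2.2.2.2])

theorem cvFold (l : List (List (String × String))) (a b c d e : Int) :
    l.foldl cvStep (cvLit a b c d e) =
      cvLit (a + ((l.map cvTl).countP cvQ1 : Int))
            (b + ((l.map cvTl).countP cvQ2 : Int))
            (c + ((l.map cvTl).countP cvQ3 : Int))
            (d + ((l.map cvTl).countP cvQ4 : Int))
            (e + ((l.map cvTl).countP cvQ5 : Int)) := by
  induction l generalizing a b c d e with
  | nil => simp
  | cons x xs ih =>
    rw [List.foldl_cons, cvStep_eq, ih]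
    simp only [List.map_cons, List.countP_cons, cvLit]
    congr 2 <;> (push_cast; split_ifs <;> simp_all <;> omega)

-- ===== VERDICT (by name: the statement is the Claim_ definition above) =====
set_option maxHeartbeats 1600000 in
theorem categorize_visuals_py_spec : Claim_equal_categorize_visuals_py := by
  intro discoveries _
  show categorize_visuals_py discoveries = categorize_visuals_py_alt discoveries
  unfold categorize_visuals_py categorize_visuals_py_alt
  dsimp only
  rw [show (PySem.Dict.ofList [("diagrams", (0:Int)), ("photos", 0), ("infographics", 0), ("charts", 0), ("other", 0)]) = cvLit 0 0 0 0 0 from rfl,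
      show (fun d => PySem.Str.lower ((PySem.Dict.ofList d).getD "title" "")) = cvTl from rfl,
      cvFold]
  simp only [cvRulesB, List.foldl_cons, List.foldl_nil, cvSieve]
  simp only [List.filter_filter]
  rw [show (fun t => ["diagram"].any fun k => PySem.Str.isIn k t) = cvQ1 from rfl,
      show (fun a => (["photo", "image"].any fun k => PySem.Str.isIn k a) && !(["diagram"].any fun k => PySem.Str.isIn k a)) = cvQ2 from rfl,
      show (fun a => (["infographic"].any fun k => PySem.Str.isIn k a) && ((!(["photo", "image"].any fun k => PySem.Str.isIn k a)) && !(["diagram"].any fun k => PySem.Str.isIn k a))) = cvQ3 from rfl,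
      show (fun a => (["chart", "graph"].any fun k => PySem.Str.isIn k a) && ((!(["infographic"].any fun k => PySem.Str.isIn k a)) && ((!(["photo", "image"].any fun k => PySem.Str.isIn k a)) && !(["diagram"].any fun k => PySem.Str.isIn k a)))) = cvQ4 from rfl,
      show (fun a => (!(["chart", "graph"].any fun k => PySem.Str.isIn k a)) && ((!(["infographic"].any fun k => PySem.Str.isIn k a)) && ((!(["photo", "image"].any fun k => PySem.Str.isIn k a)) && !(["diagram"].any fun k => PySem.Str.isIn k a)))) = cvQ5 from rfl]
  simp only [← List.countP_eq_length_filter, zero_add]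
  generalize (List.map cvTl discoveries).countP cvQ1 = n1
  generalize (List.map cvTl discoveries).countP cvQ2 = n2
  generalize (List.map cvTl discoveries).countP cvQ3 = n3
  generalize (List.map cvTl discoveries).countP cvQ4 = n4
  generalize (List.map cvTl discoveries).countP cvQ5 = n5
  split_ifs <;>
    simp_all [cvLit, PySem.Dict.ofList, PySem.Dict.insert, PySem.Dict.update,
      PySem.Dict.empty, PySem.Dict.contains, List.filter]
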